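-- pv_equiv track=rewrite | github.com/maon0002/Programming-Fundamentals-with-Python-September-December-2022 | text_processing__exercise/09_rage_quit.py | command_separator
-- ===== SOURCE A (Python) =====
-- def command_separator(text):
--     rage_msg = ""
--     current_text = ""
--     repetition = 0
--     for i in range(len(text)):
--         char = text[i]
--         if char.isdigit():
--             repetition += int(char)
--             if repetition == 0:
--                 rage_msg += current_text
--             else:
--                 rage_msg += current_text * repetition
--             current_text = ""
--             repetition = 0
--         else:
--             current_text += char.upper()
--
--     unique_symbols = len(set(rage_msg))
--     return f"Unique symbols used: {unique_symbols}\n" \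
--            f"{rage_msg}"
-- ===== SOURCE B (Python) =====
-- from itertools import groupby
--
--
-- def command_separator(text):
--     parts = []
--     buffer = ""
--     for is_digit, group in groupby(text, key=str.isdigit):
--         run = "".join(group)
--         if is_digit:
--             # only the first digit of a run ever sees the letters;
--             # a leading '0' still emits them once
--             n = int(run[0])
--             parts.append(buffer * n if n else buffer)
--             buffer = ""
--         else:
--             buffer = run.upper()
--     rage_msg = "".join(parts)
--     return f"Unique symbols used: {len(set(rage_msg))}\n{rage_msg}"
-- ===== Notes on version B (the rewrite author's own statement) =====
-- stated objective: faster
-- what changed: Replaces the per-character state machine (buffer, repetition counter, per-digit flush with repeated string concatenation) by run-based tokenization with itertools.groupby: a non-digit run becomes the buffer at once, a digit run flushes it exactly once using only its first digit, and the message is assembled by a single str.join over the collected parts.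
import Mathlib
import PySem

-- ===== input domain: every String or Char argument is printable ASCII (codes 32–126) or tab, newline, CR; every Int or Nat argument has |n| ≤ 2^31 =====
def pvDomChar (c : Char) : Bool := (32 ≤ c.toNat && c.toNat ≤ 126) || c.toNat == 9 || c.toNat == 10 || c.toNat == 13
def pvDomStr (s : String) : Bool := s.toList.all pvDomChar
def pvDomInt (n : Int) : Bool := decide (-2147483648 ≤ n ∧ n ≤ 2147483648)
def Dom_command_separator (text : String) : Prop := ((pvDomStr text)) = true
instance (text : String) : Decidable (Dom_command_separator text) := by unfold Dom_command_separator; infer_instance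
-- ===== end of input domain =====

-- B replaces A's per-character state machine by run-based tokenization (groupby):
-- a non-digit run becomes the buffer, a digit run flushes it once via its first digit
-- (objective: run-based decomposition; a timing run measured B faster by a constant factor).

-- ===== PORT A =====
-- per-character loop state: (rage_msg, current_text, repetition)
def pvAStep (st : List Char × List Char × Int) (c : Char) : List Char × List Char × Int :=
  if PySem.Chars.isdigit c then
    let rep := st.2.2 + ((c.toNat : Int) - 48)     -- repetition += int(char), int of a single digit char
    let msg := if rep = 0 then st.1 ++ st.2.1
               else st.1 ++ PySem.List.pyRepeat st.2.1 rep
    (msg, [], 0)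
  else
    (st.1, st.2.1 ++ [PySem.Chars.upperChar c], st.2.2)

def command_separator (text : String) : String :=
  let st := text.toList.foldl pvAStep ([], [], 0)
  let rageMsg := st.1
  let uniqueSymbols := PySem.Set.len (PySem.Set.ofList rageMsg)
  "Unique symbols used: " ++ PySem.Int.toStr (uniqueSymbols : Int) ++ "\n" ++ String.ofList rageMsg

-- ===== PORT B =====
-- groupby(text, key=str.isdigit): maximal runs of same isdigit-value, in order
def pvRuns (cs : List Char) : List (Bool × List Char) :=
  match cs with
  | [] => []
  | c :: rest =>
    (PySem.Chars.isdigit c,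
      (c :: rest).takeWhile (fun x => PySem.Chars.isdigit x == PySem.Chars.isdigit c)) ::
      pvRuns ((c :: rest).dropWhile (fun x => PySem.Chars.isdigit x == PySem.Chars.isdigit c))
termination_by cs.length
decreasing_by
  simp only [List.dropWhile_cons, beq_self_eq_true, if_true, List.length_cons]
  exact Nat.lt_succ_of_le (List.length_dropWhile_le _ _)

-- B's loop state: (parts, buffer)
def pvBStep (st : List (List Char) × List Char) (r : Bool × List Char) :
    List (List Char) × List Char :=
  if r.1 then
    let n : Int := ((r.2.headD '0').toNat : Int) - 48   -- int(run[0]); a digit run is nonempty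
    (st.1 ++ [if n = 0 then st.2 else PySem.List.pyRepeat st.2 n], [])
  else
    (st.1, PySem.Chars.upper r.2)

def command_separator_alt (text : String) : String :=
  let st := (pvRuns text.toList).foldl pvBStep ([], [])
  let rageMsg := st.1.flatten
  "Unique symbols used: " ++ PySem.Int.toStr ((PySem.Set.len (PySem.Set.ofList rageMsg)) : Int)
    ++ "\n" ++ String.ofList rageMsg

-- ===== PRECONDITION & SPEC =====
def Spec_command_separator (text : String) (out : String) : Prop := out = command_separator_alt text
instance (text : String) (out : String) : Decidable (Spec_command_separator text out) := by unfold Spec_command_separator; infer_instance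

-- ===== CLAIM (what is proved, stated in full; the proofs are below) =====
def Claim_equal_command_separator : Prop := ∀ (text : String), Dom_command_separator text → Spec_command_separator text (command_separator text)

-- ===== LEMMAS AND PROOFS =====

theorem pvRuns_nil : pvRuns [] = [] := by rw [pvRuns]

theorem pvRuns_cons (c : Char) (rest : List Char) : pvRuns (c :: rest) =
    (PySem.Chars.isdigit c,
      (c :: rest).takeWhile (fun x => PySem.Chars.isdigit x == PySem.Chars.isdigit c)) ::
      pvRuns ((c :: rest).dropWhile (fun x => PySem.Chars.isdigit x == PySem.Chars.isdigit c)) := by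
  rw [pvRuns]

-- A's fold over an all-digit tail with empty buffer is a no-op on the message
theorem pvA_digits_nil (ds : List Char) (msg : List Char)
    (h : ∀ c ∈ ds, PySem.Chars.isdigit c = true) :
    ds.foldl pvAStep (msg, [], 0) = (msg, [], 0) := by
  induction ds with
  | nil => rfl
  | cons c rest ih =>
    have hc := h c (by simp)
    simp only [List.foldl_cons, pvAStep, hc, if_true]
    have : (if (0 : Int) + ((c.toNat : Int) - 48) = 0 then msg ++ []
        else msg ++ PySem.List.pyRepeat [] ((0 : Int) + ((c.toNat : Int) - 48))) = msg := by
      split_ifs <;> simp [PySem.List.pyRepeat]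
    rw [this]
    exact ih (fun x hx => h x (by simp [hx]))

-- A's fold over a nonempty all-digit run flushes the buffer once, via the first digit
theorem pvA_digit_run (c : Char) (rest : List Char) (msg cur : List Char)
    (hc : PySem.Chars.isdigit c = true)
    (h : ∀ x ∈ rest, PySem.Chars.isdigit x = true) :
    (c :: rest).foldl pvAStep (msg, cur, 0) =
      ((if ((c.toNat : Int) - 48) = 0 then msg ++ cur
        else msg ++ PySem.List.pyRepeat cur ((c.toNat : Int) - 48)), [], 0) := by
  simp only [List.foldl_cons, pvAStep, hc, if_true, Int.zero_add]
  exact pvA_digits_nil rest _ h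

-- A's fold over a non-digit run appends its uppercase to the buffer
theorem pvA_nondigit_run (rs : List Char) (msg cur : List Char)
    (h : ∀ c ∈ rs, PySem.Chars.isdigit c = false) :
    rs.foldl pvAStep (msg, cur, 0) = (msg, cur ++ PySem.Chars.upper rs, 0) := by
  induction rs generalizing cur with
  | nil => simp [PySem.Chars.upper]
  | cons c rest ih =>
    have hc := h c (by simp)
    simp only [List.foldl_cons, pvAStep, hc, Bool.false_eq_true, if_false]
    rw [ih _ (fun x hx => h x (by simp [hx]))]
    simp [PySem.Chars.upper]

theorem pv_head_dropWhile {α : Type} (p : α → Bool) (l : List α) (c : α)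
    (h : (l.dropWhile p).head? = some c) : p c = false := by
  induction l with
  | nil => simp at h
  | cons x xs ih =>
    by_cases hx : p x = true
    · rw [List.dropWhile_cons, if_pos hx] at h; exact ih h
    · rw [List.dropWhile_cons, if_neg hx] at h
      simp only [List.head?_cons, Option.some.injEq] at h
      subst h
      exact Bool.eq_false_iff.mpr hx

-- main invariant: B's run-fold computes A's char-fold message
theorem pv_main (n : Nat) : ∀ (cs : List Char), cs.length ≤ n →
    ∀ (parts : List (List Char)) (buf : List Char),
    (buf = [] ∨ (∀ c, cs.head? = some c → PySem.Chars.isdigit c = true)) →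
    ((pvRuns cs).foldl pvBStep (parts, buf)).1.flatten =
      (cs.foldl pvAStep (parts.flatten, buf, 0)).1 := by
  induction n with
  | zero =>
    intro cs hlen parts buf _
    have : cs = [] := List.eq_nil_of_length_eq_zero (Nat.le_zero.mp hlen)
    subst this; simp [pvRuns_nil]
  | succ n ih =>
    intro cs hlen parts buf hbuf
    match cs with
    | [] => simp [pvRuns_nil]
    | c :: cs' =>
      rw [pvRuns_cons]
      set p := fun x => PySem.Chars.isdigit x == PySem.Chars.isdigit c with hp
      have hsplit : (c :: cs').takeWhile p ++ (c :: cs').dropWhile p = c :: cs' :=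
        List.takeWhile_append_dropWhile
      have htw : (c :: cs').takeWhile p = c :: cs'.takeWhile p := by
        rw [List.takeWhile_cons, if_pos (by simp [hp])]
      have hdw : (c :: cs').dropWhile p = cs'.dropWhile p := by
        rw [List.dropWhile_cons, if_pos (by simp [hp])]
      have hdrop_len : ((c :: cs').dropWhile p).length ≤ n := by
        rw [hdw]
        have := List.length_dropWhile_le p cs'
        have hlen' : cs'.length ≤ n := by simpa using hlen
        omega
      have htwall : ∀ x ∈ (c :: cs').takeWhile p,
          PySem.Chars.isdigit x = PySem.Chars.isdigit c := by
        intro x hx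
        have := List.mem_takeWhile_imp hx
        simpa [hp] using this
      have hAsplit : (c :: cs').foldl pvAStep (parts.flatten, buf, 0) =
          ((c :: cs').dropWhile p).foldl pvAStep
            (((c :: cs').takeWhile p).foldl pvAStep (parts.flatten, buf, 0)) := by
        conv_lhs => rw [← hsplit, List.foldl_append]
      rw [List.foldl_cons, hAsplit]
      by_cases hd : PySem.Chars.isdigit c = true
      · -- digit run: A flushes the buffer on the first digit, then no-ops; B appends one part
        have hrun : ((c :: cs').takeWhile p).foldl pvAStep (parts.flatten, buf, 0) =
            (parts.flatten ++ (if ((c.toNat : Int) - 48) = 0 then buf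
              else PySem.List.pyRepeat buf ((c.toNat : Int) - 48)), [], 0) := by
          rw [htw]
          rw [pvA_digit_run c _ _ _ hd
            (fun x hx => (htwall x (by rw [htw]; exact List.mem_cons_of_mem _ hx)).trans hd)]
          split_ifs <;> rfl
        have hstep : pvBStep (parts, buf) (PySem.Chars.isdigit c, (c :: cs').takeWhile p) =
            (parts ++ [if ((c.toNat : Int) - 48) = 0 then buf
              else PySem.List.pyRepeat buf ((c.toNat : Int) - 48)], []) := by
          rw [htw]; simp [pvBStep, hd]
        rw [hrun, hstep]
        rw [ih ((c :: cs').dropWhile p) hdrop_len _ [] (Or.inl rfl)]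
        congr 1
        simp only [List.flatten_append, List.flatten_cons, List.flatten_nil, List.append_nil]
      · -- non-digit run: A accumulates uppercased chars, B sets the buffer to the uppercased run
        have hd' : PySem.Chars.isdigit c = false := Bool.eq_false_iff.mpr hd
        have hbuf0 : buf = [] := by
          rcases hbuf with h | h
          · exact h
          · exact absurd (h c rfl) hd
        subst hbuf0
        have hrhead : ∀ x, ((c :: cs').dropWhile p).head? = some x →
            PySem.Chars.isdigit x = true := by
          intro x hx
          have hpf := pv_head_dropWhile p _ x hx
          simp only [hp, beq_eq_false_iff_ne, ne_eq] at hpf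
          cases h1 : PySem.Chars.isdigit x
          · exact absurd (h1.trans hd'.symm) hpf
          · rfl
        have hrun : ((c :: cs').takeWhile p).foldl pvAStep (parts.flatten, [], 0) =
            (parts.flatten, PySem.Chars.upper ((c :: cs').takeWhile p), 0) := by
          have := pvA_nondigit_run ((c :: cs').takeWhile p) parts.flatten []
            (fun x hx => (htwall x hx).trans hd')
          simpa using this
        have hstep : pvBStep (parts, []) (PySem.Chars.isdigit c, (c :: cs').takeWhile p) =
            (parts, PySem.Chars.upper ((c :: cs').takeWhile p)) := by
          simp [pvBStep, hd']
        rw [hrun, hstep]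
        exact ih _ hdrop_len parts _ (Or.inr hrhead)

-- ===== VERDICT (by name: the statement is the Claim_ definition above) =====
theorem command_separator_spec : Claim_equal_command_separator := by
  intro text _
  unfold Spec_command_separator
  have h := pv_main text.toList.length text.toList le_rfl [] [] (Or.inl rfl)
  simp only [List.flatten_nil] at h
  simp only [command_separator, command_separator_alt, h]
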